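-- pv_equiv track=rewrite | github.com/costamay/codility-practice | ten_bricks.py | solution
-- ===== SOURCE A (Python) =====
-- def solution(A):
--     total_moves = 0
--     for i in range(len(A) - 1):
--         if A[i] < 10:
--             moves = 10 - A[i]
--             A[i + 1] -= moves
--             A[i] += moves
--             total_moves += moves
--         if A[i] > 10:
--             moves = A[i] - 10
--             A[i + 1] += moves
--             A[i] -= moves
--             total_moves += moves
--     return total_moves
-- ===== SOURCE B (Python) =====
-- def solution(A):
--     carry = 0
--     total = 0
--     for x in A[:-1]:
--         carry += x - 10
--         total += abs(carry)
--     return total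
-- ===== Notes on version B (the rewrite author's own statement) =====
-- stated objective: simpler
-- what changed: B replaces A's two symmetric if-branches that repeatedly write the surplus into the next array slot with a single running carry accumulator (total += abs(carry)), reading the original list once and never mutating it.
import Mathlib
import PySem

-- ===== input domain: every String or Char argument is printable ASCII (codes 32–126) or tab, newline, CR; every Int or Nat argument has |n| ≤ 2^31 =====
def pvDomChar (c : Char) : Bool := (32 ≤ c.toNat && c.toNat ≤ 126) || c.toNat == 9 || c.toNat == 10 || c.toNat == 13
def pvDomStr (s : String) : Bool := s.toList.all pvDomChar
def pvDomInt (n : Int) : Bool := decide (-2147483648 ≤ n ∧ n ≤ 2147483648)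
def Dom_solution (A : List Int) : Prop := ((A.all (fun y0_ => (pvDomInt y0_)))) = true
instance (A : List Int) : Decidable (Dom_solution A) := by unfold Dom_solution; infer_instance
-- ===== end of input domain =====

-- B changes the decomposition (running carry + abs instead of two branches writing into the array);
-- equivalence is about the RETURN value only: A mutates its argument (first n-1 entries become 10), B does not.

-- ===== PORT A =====
-- loop body of A's 'for i in range(len(A) - 1)'; state = (A, total_moves).
-- indices are the nonnegative 0..len(A)-2, so range(len(A)-1) is ported as List.range (A.length - 1)
-- and A[i] / A[i+1] reads and writes as getD / set at those in-range Nat indices (exact here).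
def solutionStep (st : List Int × Int) (i : Nat) : List Int × Int :=
  let a := st.1
  let total := st.2
  let st1 : List Int × Int :=
    if a.getD i 0 < 10 then
      let moves := 10 - a.getD i 0
      let a1 := a.set (i + 1) (a.getD (i + 1) 0 - moves)
      let a2 := a1.set i (a1.getD i 0 + moves)
      (a2, total + moves)
    else (a, total)
  if st1.1.getD i 0 > 10 then
    let moves := st1.1.getD i 0 - 10
    let b1 := st1.1.set (i + 1) (st1.1.getD (i + 1) 0 + moves)
    let b2 := b1.set i (b1.getD i 0 - moves)
    (b2, st1.2 + moves)
  else st1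

def solution (A : List Int) : Int :=
  ((List.range (A.length - 1)).foldl solutionStep (A, 0)).2

-- ===== PORT B =====
-- loop body of B's 'for x in A[:-1]'; state = (carry, total)
def solutionAltStep (st : Int × Int) (x : Int) : Int × Int :=
  (st.1 + (x - 10), st.2 + |st.1 + (x - 10)|)

def solution_alt (A : List Int) : Int :=
  ((PySem.List.slice A none (some (-1))).foldl solutionAltStep (0, 0)).2

-- ===== PRECONDITION & SPEC =====
def Spec_solution (A : List Int) (out : Int) : Prop := out = solution_alt A
instance (A : List Int) (out : Int) : Decidable (Spec_solution A out) := by unfold Spec_solution; infer_instance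

-- ===== CLAIM (what is proved, stated in full; the proofs are below) =====
def Claim_equal_solution : Prop := ∀ (A : List Int), Dom_solution A → Spec_solution A (solution A)

-- ===== LEMMAS AND PROOFS =====

-- the cascade both programs compute: push each element's deviation from 10 into its successor
def cascade : List Int → Int
  | x :: y :: rest => |x - 10| + cascade ((y + (x - 10)) :: rest)
  | _ => 0
termination_by l => l.length
decreasing_by simp

theorem getD_append_len (P : List Int) (x : Int) (r : List Int) :
    (P ++ x :: r).getD P.length 0 = x := by
  simp

theorem getD_append_len1 (P : List Int) (x y : Int) (r : List Int) :
    (P ++ x :: y :: r).getD (P.length + 1) 0 = y := by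
  have : P.length + 1 = (P ++ [x]).length := by simp
  rw [this, List.append_cons]
  simp

theorem set_append_len (P : List Int) (x : Int) (r : List Int) (v : Int) :
    (P ++ x :: r).set P.length v = P ++ v :: r := by
  induction P with
  | nil => rfl
  | cons p P ih => simp [ih]

theorem set_append_len1 (P : List Int) (x y : Int) (r : List Int) (v : Int) :
    (P ++ x :: y :: r).set (P.length + 1) v = P ++ x :: v :: r := by
  induction P with
  | nil => rfl
  | cons p P ih => simp [ih]

theorem solutionStep_eq (P : List Int) (x y : Int) (rest : List Int) (t : Int) :
    solutionStep (P ++ x :: y :: rest, t) P.length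
      = (P ++ (10 : Int) :: (y + (x - 10)) :: rest, t + |x - 10|) := by
  unfold solutionStep
  rcases lt_trichotomy x 10 with h | h | h
  · simp only [getD_append_len, set_append_len1, set_append_len, getD_append_len1,
      if_pos h]
    have h2 : ¬ (x + (10 - x) > (10 : Int)) := by omega
    rw [if_neg h2]
    have e1 : x + (10 - x) = (10 : Int) := by ring
    have e2 : y - (10 - x) = y + (x - 10) := by ring
    have e3 : |x - 10| = 10 - x := by rw [abs_of_nonpos (by omega)]; ring
    rw [e1, e2, e3]
  · subst h
    simp only [getD_append_len, if_neg (by omega : ¬ (10:Int) < 10)]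
    norm_num
  · simp only [getD_append_len, if_neg (by omega : ¬ x < 10), if_pos (by omega : x > 10),
      set_append_len1, getD_append_len1, set_append_len]
    have e1 : x - (x - 10) = (10 : Int) := by ring
    have e3 : |x - 10| = x - 10 := abs_of_nonneg (by omega)
    rw [e1, e3]

theorem aloop_inv (rest : List Int) : ∀ (P : List Int) (x y t : Int),
    ((List.range' P.length (rest.length + 1)).foldl solutionStep (P ++ x :: y :: rest, t)).2
      = t + cascade (x :: y :: rest) := by
  induction rest with
  | nil =>
    intro P x y t
    simp [List.range', solutionStep_eq P x y [] t, cascade]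
  | cons z rest ih =>
    intro P x y t
    have hr : List.range' P.length (rest.length + 1 + 1)
        = P.length :: List.range' (P.length + 1) (rest.length + 1) := by
      simp [List.range'_succ]
    simp only [List.length_cons, hr, List.foldl_cons, solutionStep_eq P x y (z :: rest) t]
    have hP : P.length + 1 = (P ++ [(10 : Int)]).length := by simp
    have happ : P ++ (10 : Int) :: (y + (x - 10)) :: z :: rest
        = (P ++ [(10 : Int)]) ++ (y + (x - 10)) :: z :: rest := by simp
    rw [hP, happ, ih (P ++ [(10 : Int)]) (y + (x - 10)) z (t + |x - 10|)]
    show t + |x - 10| + cascade ((y + (x - 10)) :: z :: rest) = t + cascade (x :: y :: z :: rest)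
    simp only [cascade]
    ring

theorem bloop_inv (l : List Int) : ∀ (c t : Int),
    (l.dropLast.foldl solutionAltStep (c, t)).2 = t + cascade ((l.headI + c) :: l.tail) := by
  induction l with
  | nil => intro c t; simp [cascade]
  | cons x l ih =>
    intro c t
    cases l with
    | nil => simp [cascade]
    | cons y r =>
      have hd : (x :: y :: r).dropLast = x :: (y :: r).dropLast := by simp
      rw [hd, List.foldl_cons]
      show ((y :: r).dropLast.foldl solutionAltStep (c + (x - 10), t + |c + (x - 10)|)).2 = _
      rw [ih (c + (x - 10)) (t + |c + (x - 10)|)]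
      show t + |c + (x - 10)| + cascade ((y + (c + (x - 10))) :: r)
          = t + cascade ((x + c) :: y :: r)
      simp only [cascade]
      have h1 : |c + (x - 10)| = |x + c - 10| := by ring_nf
      have h2 : y + (c + (x - 10)) = y + (x + c - 10) := by ring
      rw [h1, h2]
      ring

theorem solution_alt_eq_cascade (A : List Int) : solution_alt A = cascade A := by
  unfold solution_alt
  rw [PySem.List.slice_to_neg_one]
  rw [bloop_inv A 0 0]
  cases A with
  | nil => simp [cascade]
  | cons x l => simp [List.headI]

-- ===== VERDICT (by name: the statement is the Claim_ definition above) =====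
theorem solution_spec : Claim_equal_solution := by
  intro A _
  show solution A = solution_alt A
  rw [solution_alt_eq_cascade]
  unfold solution
  cases A with
  | nil => simp [cascade]
  | cons x l =>
    cases l with
    | nil => simp [cascade]
    | cons y rest =>
      have hlen : (x :: y :: rest).length - 1 = rest.length + 1 := by simp
      rw [hlen, List.range_eq_range']
      have := aloop_inv rest [] x y 0
      simpa using this
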